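-- pv_equiv track=rewrite | github.com/Rix95/Advent-of-Code-2023 | Python/Day01/day01.py | convert_digit_substrings
-- ===== SOURCE A (Python) =====
-- def convert_digit_substrings(line):
--     digit_dic = {
--         "one": "o1ne",
--         "two": "t2wo",
--         "three": "t3hree",
--         "four": "f4our",
--         "five": "f5ive",
--         "six": "s6ix",
--         "seven": "s7even",
--         "eight": "e8ight",
--         "nine": "n9ine",
--     }
--
--     line_length = len(line)
--     for digit in digit_dic:
--         if digit in line:
--             line = line.replace(digit, digit_dic[digit])
--
--     return line
-- ===== SOURCE B (Python) =====
-- def convert_digit_substrings(line):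
--     words = [
--         ("one", "1"), ("two", "2"), ("three", "3"),
--         ("four", "4"), ("five", "5"), ("six", "6"),
--         ("seven", "7"), ("eight", "8"), ("nine", "9"),
--     ]
--     res = []
--     rest = line
--     while rest:
--         res.append(rest[0])
--         for word, digit in words:
--             if rest.startswith(word):
--                 res.append(digit)
--                 break
--         rest = rest[1:]
--     return "".join(res)
-- ===== Notes on version B (the rewrite author's own statement) =====
-- stated objective: alternative
-- what changed: Replaces A's nine sequential str.replace passes (each rescanning the whole string) with a single left-to-right scan that emits each character and inserts the matching word's digit right after its first letter, handling overlapping words by advancing one character at a time.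
import Mathlib
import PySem

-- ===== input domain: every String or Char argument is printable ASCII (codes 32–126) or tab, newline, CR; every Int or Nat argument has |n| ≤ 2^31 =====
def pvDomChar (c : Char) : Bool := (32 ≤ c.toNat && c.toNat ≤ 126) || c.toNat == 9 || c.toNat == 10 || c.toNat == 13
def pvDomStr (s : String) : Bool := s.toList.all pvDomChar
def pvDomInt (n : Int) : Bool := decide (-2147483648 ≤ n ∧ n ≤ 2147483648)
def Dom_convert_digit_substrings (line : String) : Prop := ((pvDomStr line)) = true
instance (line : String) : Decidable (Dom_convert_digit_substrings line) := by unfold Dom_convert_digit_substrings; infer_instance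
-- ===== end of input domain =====

-- B replaces A's nine sequential str.replace passes by a single left-to-right scan that
-- inserts each word's digit after the word's first letter (objective: alternative).

-- ===== PORT A =====
-- literal port of A: a dict of word→replacement, then one guarded replace pass per key
def convert_digit_substrings (line : String) : String :=
  let digit_dic : PySem.Dict String String := PySem.Dict.ofList
    [("one", "o1ne"), ("two", "t2wo"), ("three", "t3hree"), ("four", "f4our"),
     ("five", "f5ive"), ("six", "s6ix"), ("seven", "s7even"), ("eight", "e8ight"),
     ("nine", "n9ine")]
  let _line_length := PySem.Str.len line
  digit_dic.keys.foldl
    (fun line digit =>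
      if PySem.Str.isIn digit line then
        PySem.Str.replace line digit (digit_dic.getD digit "")
      else line)
    line

-- ===== PORT B =====
-- Source B's word list; the single-character digit strings are ported as their characters,
-- since res only ever holds single characters and "".join(res) is String.ofList
def pvWords : List (List Char × Char) :=
  [("one".toList, '1'), ("two".toList, '2'), ("three".toList, '3'),
   ("four".toList, '4'), ("five".toList, '5'), ("six".toList, '6'),
   ("seven".toList, '7'), ("eight".toList, '8'), ("nine".toList, '9')]

-- Source B's inner `for word, digit in words: if rest.startswith(word): append digit; break`
def pvFindDigit : List (List Char × Char) → List Char → List Char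
  | [], _ => []
  | (w, d) :: ws, l => if PySem.Chars.startswith l w then [d] else pvFindDigit ws l

-- Source B's while loop: emit rest[0], maybe a digit, then continue on rest[1:]
def pvScanW (ws : List (List Char × Char)) : List Char → List Char
  | [] => []
  | c :: t => c :: (pvFindDigit ws (c :: t) ++ pvScanW ws t)

def convert_digit_substrings_alt (line : String) : String :=
  String.ofList (pvScanW pvWords line.toList)

-- ===== PRECONDITION & SPEC =====
def Spec_convert_digit_substrings (line : String) (out : String) : Prop := out = convert_digit_substrings_alt line
instance (line : String) (out : String) : Decidable (Spec_convert_digit_substrings line out) := by unfold Spec_convert_digit_substrings; infer_instance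

-- ===== CLAIM (what is proved, stated in full; the proofs are below) =====
def Claim_equal_convert_digit_substrings : Prop := ∀ (line : String), Dom_convert_digit_substrings line → Spec_convert_digit_substrings line (convert_digit_substrings line)

-- ===== LEMMAS AND PROOFS =====

-- single-word scan: what one of A's replace passes does, char by char
def pvScan1 (w : List Char) (d : Char) : List Char → List Char
  | [] => []
  | c :: t => c :: ((if w.isPrefixOf (c :: t) then [d] else []) ++ pvScan1 w d t)

def pvWordList : List (List Char) := pvWords.map Prod.fst

-- decidable facts about the nine concrete words
theorem pvF_len : ∀ w ∈ pvWordList, 3 ≤ w.length := by decide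

theorem pvF_not_infix : ∀ u ∈ pvWordList, ∀ v ∈ pvWordList, u ≠ v → ¬ u <:+: v := by decide

theorem pvF_self : ∀ w ∈ pvWordList, ∀ j ∈ List.range w.length, 0 < j → ¬ (w.drop j <+: w) := by
  decide

set_option maxRecDepth 10000 in
theorem pvF_cross : ∀ u ∈ pvWordList, ∀ v ∈ pvWordList, ∀ j ∈ List.range u.length,
    0 < j → j + 2 ≤ u.length → ¬ (u.drop j <+: v) := by decide

theorem pvF_digit : ∀ u ∈ pvWordList, ∀ c ∈ u, ∀ p ∈ pvWords, c ≠ p.2 := by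
  have h : (pvWordList.all (fun u => u.all (fun c => pvWords.all (fun p => c != p.2)))) = true := by
    rfl
  simpa [List.all_eq_true, bne_iff_ne] using h

-- no word of the list matches strictly inside another word (with ≥ 2 chars of it left)
theorem pvNoMatchInside {u v : List Char} (hu : u ∈ pvWordList) (hv : v ∈ pvWordList)
    {j : ℕ} (hj : 0 < j) (hj2 : j + 2 ≤ u.length) (r : List Char) :
    ¬ v <+: (u.drop j ++ r) := by
  intro hpre
  have h2 : u.drop j <+: u.drop j ++ r := List.prefix_append _ _
  rcases List.prefix_or_prefix_of_prefix hpre h2 with h | h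
  · by_cases huv : v = u
    · subst huv
      have hlen := h.length_le
      have : (v.drop j).length = v.length - j := List.length_drop ..
      omega
    · exact pvF_not_infix v hv u hu huv (h.isInfix.trans (List.drop_suffix j u).isInfix)
  · exact pvF_cross u hu v hv j (List.mem_range.mpr (by omega)) hj hj2 h

-- a word never matches strictly inside itself
theorem pvSelfSkip {w : List Char} (hw : w ∈ pvWordList) {j : ℕ} (hj : 0 < j)
    (hj2 : j < w.length) (r : List Char) : ¬ w <+: (w.drop j ++ r) := by
  intro hpre
  have h2 : w.drop j <+: w.drop j ++ r := List.prefix_append _ _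
  rcases List.prefix_or_prefix_of_prefix hpre h2 with h | h
  · have hlen := h.length_le
    have : (w.drop j).length = w.length - j := List.length_drop ..
    omega
  · exact pvF_self w hw j (List.mem_range.mpr hj2) hj h

-- the single-word scan copies the tail of a just-matched word unchanged
theorem pvScan1_dropSkip {w : List Char} (hw : w ∈ pvWordList) (d : Char) :
    ∀ n j r, n = w.length - j → 0 < j → j ≤ w.length →
      pvScan1 w d (w.drop j ++ r) = w.drop j ++ pvScan1 w d r := by
  intro n
  induction n with
  | zero =>
    intro j r hn hj hjle
    have hj' : j = w.length := by omega
    subst hj'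
    simp [List.drop_length]
  | succ m ih =>
    intro j r hn hj hjle
    have hlt : j < w.length := by omega
    have hdrop : w.drop j = w[j] :: w.drop (j + 1) := List.drop_eq_getElem_cons hlt
    have hnomatch : ¬ w <+: (w.drop j ++ r) := pvSelfSkip hw hj hlt r
    rw [hdrop, List.cons_append]
    show pvScan1 w d (w[j] :: (w.drop (j + 1) ++ r)) = _
    rw [pvScan1]
    rw [if_neg (by rw [← List.cons_append, ← hdrop]
                   simpa [List.isPrefixOf_iff_prefix] using hnomatch)]
    rw [List.nil_append, ih (j + 1) r (by omega) (by omega) (by omega)]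
    rw [List.cons_append]

-- replace's worker equals the single-word scan
theorem pvGo_eq_scan1 {w : List Char} (hw : w ∈ pvWordList) {wc : Char} {wt : List Char}
    (hsh : w = wc :: wt) (d : Char) :
    ∀ fuel l acc, l.length ≤ fuel →
      PySem.Chars.replace.go w (wc :: d :: wt) fuel l acc = acc.reverse ++ pvScan1 w d l := by
  intro fuel
  induction fuel with
  | zero =>
    intro l acc h
    have hl : l = [] := List.eq_nil_of_length_eq_zero (by omega)
    subst hl
    simp [PySem.Chars.replace.go, pvScan1]
  | succ f ih =>
    intro l acc h
    cases l with
    | nil => simp [PySem.Chars.replace.go, pvScan1]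
    | cons c t =>
      by_cases hpre : w <+: (c :: t)
      · obtain ⟨rest, hrest⟩ := hpre
        have hw3 := pvF_len w hw
        have hlenstep : (c :: t).drop w.length = rest := by rw [← hrest]; exact List.drop_left ..
        have hlenrest : rest.length ≤ f := by
          have h2 := congrArg List.length hrest
          simp at h2 h
          omega
        rw [PySem.Chars.replace.go]
        rw [if_pos (List.isPrefixOf_iff_prefix.mpr ⟨rest, hrest⟩)]
        rw [hlenstep, ih rest _ hlenrest]
        have hcw : wc = c ∧ wt ++ rest = t := by
          rw [hsh] at hrest
          exact ⟨List.head_eq_of_cons_eq hrest, List.tail_eq_of_cons_eq hrest⟩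
        obtain ⟨hcw1, hcw2⟩ := hcw
        have hwt : w.drop 1 = wt := by rw [hsh]; rfl
        rw [pvScan1]
        rw [if_pos (by simpa [List.isPrefixOf_iff_prefix] using (⟨rest, hrest⟩ : w <+: c :: t))]
        rw [← hcw2, ← hwt,
          pvScan1_dropSkip hw d (w.length - 1) 1 rest rfl (by omega) (by omega)]
        simp [hsh, hcw1]
      · rw [PySem.Chars.replace.go]
        rw [if_neg (by simpa [List.isPrefixOf_iff_prefix] using hpre)]
        rw [ih t _ (by simpa using h)]
        rw [pvScan1, if_neg (by simpa [List.isPrefixOf_iff_prefix] using hpre)]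
        simp

theorem pvReplace_eq_scan1 {w : List Char} (hw : w ∈ pvWordList) {wc : Char} {wt : List Char}
    (hsh : w = wc :: wt) (d : Char) (l : List Char) :
    PySem.Chars.replace l w (wc :: d :: wt) = pvScan1 w d l := by
  rw [PySem.Chars.replace, if_neg (by simp [hsh])]
  simpa using pvGo_eq_scan1 hw hsh d l.length l [] le_rfl

theorem pvScan1_id {w : List Char} (d : Char) :
    ∀ l, (∀ j, ¬ w <+: l.drop j) → pvScan1 w d l = l := by
  intro l
  induction l with
  | nil => intro _; rfl
  | cons c t ih =>
    intro h
    rw [pvScan1, if_neg (by simpa [List.isPrefixOf_iff_prefix] using h 0)]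
    rw [List.nil_append, ih (fun j => by simpa using h (j + 1))]

-- one guarded replace pass of A = the single-word scan (String level)
theorem pvStep_eq {w rep : String} (hw : w.toList ∈ pvWordList) {wc : Char} {wt : List Char}
    (hsh : w.toList = wc :: wt) {d : Char} (hr : rep.toList = wc :: d :: wt) (l : String) :
    (if PySem.Str.isIn w l then PySem.Str.replace l w rep else l)
      = String.ofList (pvScan1 w.toList d l.toList) := by
  by_cases hin : PySem.Chars.isIn w.toList l.toList = true
  · rw [if_pos (by simpa [PySem.Str.isIn] using hin)]
    rw [PySem.Str.replace, hr, pvReplace_eq_scan1 hw hsh d l.toList]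
  · rw [if_neg (by simpa [PySem.Str.isIn] using hin)]
    have hnoj : ∀ j, ¬ w.toList <+: l.toList.drop j := by
      intro j hj
      exact hin ((PySem.Chars.exists_prefix_drop_iff_isIn w.toList l.toList).mp ⟨j, hj⟩)
    rw [pvScan1_id d l.toList hnoj, String.ofList_toList]

theorem pvFd_nil_iff (ws : List (List Char × Char)) (l : List Char) :
    pvFindDigit ws l = [] ↔ ∀ p ∈ ws, ¬ p.1 <+: l := by
  induction ws with
  | nil => simp [pvFindDigit]
  | cons p ws ih =>
    obtain ⟨pw, pd⟩ := p
    rw [pvFindDigit]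
    by_cases hp : pw <+: l
    · simp [PySem.Chars.startswith, List.isPrefixOf_iff_prefix, hp]
    · simp [PySem.Chars.startswith, List.isPrefixOf_iff_prefix, hp, ih]

theorem pvFd_mem {ws : List (List Char × Char)} {l : List Char} (h : pvFindDigit ws l ≠ []) :
    ∃ p ∈ ws, p.1 <+: l ∧ pvFindDigit ws l = [p.2] := by
  induction ws with
  | nil => simp [pvFindDigit] at h
  | cons p ws ih =>
    obtain ⟨pw, pd⟩ := p
    by_cases hp : pw <+: l
    · exact ⟨(pw, pd), by simp, hp, by
        rw [pvFindDigit, if_pos (by simpa [PySem.Chars.startswith, List.isPrefixOf_iff_prefix])]⟩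
    · rw [pvFindDigit,
        if_neg (by simpa [PySem.Chars.startswith, List.isPrefixOf_iff_prefix] using hp)] at h ⊢
      obtain ⟨q, hq, hq2, hq3⟩ := ih h
      exact ⟨q, by simp [hq], hq2, hq3⟩

theorem pvFd_append (ws ws' : List (List Char × Char)) (l : List Char) :
    pvFindDigit (ws ++ ws') l
      = if pvFindDigit ws l = [] then pvFindDigit ws' l else pvFindDigit ws l := by
  induction ws with
  | nil => simp [pvFindDigit]
  | cons p ws ih =>
    obtain ⟨pw, pd⟩ := p
    rw [List.cons_append, pvFindDigit, pvFindDigit]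
    by_cases hp : PySem.Chars.startswith l pw = true
    · simp [hp]
    · simp only [hp]
      simpa using ih

-- the combined scan copies any prefix it finds no word-match under
theorem pvPres (ws : List (List Char × Char)) :
    ∀ x t, x <+: t → (∀ j, j + 1 < x.length → ∀ p ∈ ws, ¬ p.1 <+: t.drop j) →
      x <+: pvScanW ws t := by
  intro x
  induction x with
  | nil => intro t _ _; exact List.nil_prefix
  | cons a x' ih =>
    intro t hpre hcond
    obtain ⟨r, hr⟩ := hpre
    rw [List.cons_append] at hr
    subst hr
    rw [pvScanW]
    cases x' with
    | nil => exact ⟨_, rfl⟩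
    | cons b x'' =>
      have h0 : pvFindDigit ws (a :: ((b :: x'') ++ r)) = [] := by
        rw [pvFd_nil_iff]
        intro p hp
        simpa using hcond 0 (by simp) p hp
      rw [h0, List.nil_append, List.cons_prefix_cons]
      refine ⟨rfl, ih ((b :: x'') ++ r) ⟨r, rfl⟩ ?_⟩
      intro j hj p hp
      simpa using hcond (j + 1) (by simpa using hj) p hp

-- a digit-free prefix of the combined scan's output is a prefix of its input
theorem pvRefl (ws : List (List Char × Char)) :
    ∀ x u, (∀ c ∈ x, ∀ p ∈ ws, c ≠ p.2) → x <+: pvScanW ws u → x <+: u := by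
  intro x
  induction x with
  | nil => intro u _ _; exact List.nil_prefix
  | cons a x' ih =>
    intro u hchars hpre
    cases u with
    | nil => simp [pvScanW] at hpre
    | cons b u' =>
      rw [pvScanW] at hpre
      rw [List.cons_prefix_cons] at hpre
      obtain ⟨hab, hpre'⟩ := hpre
      subst hab
      rw [List.cons_prefix_cons]
      refine ⟨rfl, ?_⟩
      by_cases hfd : pvFindDigit ws (a :: u') = []
      · rw [hfd, List.nil_append] at hpre'
        exact ih u' (fun c hc => hchars c (by simp [hc])) hpre'
      · obtain ⟨p, hp, _, hfd2⟩ := pvFd_mem hfd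
        rw [hfd2] at hpre'
        cases x' with
        | nil => exact List.nil_prefix
        | cons c2 x'' =>
          rw [List.cons_append, List.cons_prefix_cons] at hpre'
          exact absurd hpre'.1 (hchars c2 (by simp) p hp)

theorem pvScanW_nil_words : ∀ l, pvScanW [] l = l := by
  intro l
  induction l with
  | nil => rfl
  | cons c t ih => rw [pvScanW, pvFindDigit, List.nil_append, ih]

-- key lemma: running one more single-word scan over the combined scan's output
-- extends the combined scan's word list
theorem pvK {ws : List (List Char × Char)} (hws : ∀ p ∈ ws, p ∈ pvWords)
    {w : List Char} {d : Char} (hp : (w, d) ∈ pvWords) :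
    ∀ l, pvScan1 w d (pvScanW ws l) = pvScanW (ws ++ [(w, d)]) l := by
  have hwmem : w ∈ pvWordList := List.mem_map.mpr ⟨(w, d), hp, rfl⟩
  have hw3 := pvF_len w hwmem
  intro l
  induction l with
  | nil => rfl
  | cons c t ih =>
    conv_rhs => rw [pvScanW]
    rw [pvFd_append]
    by_cases hfd : pvFindDigit ws (c :: t) = []
    · rw [if_pos hfd]
      have hWnil : pvScanW ws (c :: t) = c :: pvScanW ws t := by
        rw [pvScanW, hfd, List.nil_append]
      by_cases hwpre : w <+: (c :: t)
      · -- w matches at the head of the input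
        obtain ⟨rest, hrest⟩ := hwpre
        obtain ⟨wc, wt, hsh⟩ : ∃ wc wt, w = wc :: wt := by
          cases w with
          | nil => simp at hw3
          | cons x y => exact ⟨x, y, rfl⟩
        have hcw : wc = c ∧ wt ++ rest = t := by
          rw [hsh] at hrest
          exact ⟨List.head_eq_of_cons_eq hrest, List.tail_eq_of_cons_eq hrest⟩
        obtain ⟨hcw1, hcw2⟩ := hcw
        have hwtpre : wt <+: pvScanW ws t := by
          refine pvPres ws wt t ⟨rest, hcw2⟩ ?_
          intro j hj p hpmem hbad
          have hpw : p.1 ∈ pvWordList := List.mem_map.mpr ⟨p, hws p hpmem, rfl⟩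
          have hwtlen : wt.length + 1 = w.length := by rw [hsh]; simp
          have hdropt : t.drop j = w.drop (j + 1) ++ rest := by
            rw [← hcw2, List.drop_append_of_le_length (by omega), hsh, List.drop_succ_cons]
          rw [hdropt] at hbad
          exact pvNoMatchInside hwmem hpw (j := j + 1) (by omega) (by omega) rest hbad
        have hmatch : w <+: c :: pvScanW ws t := by
          rw [hsh, List.cons_prefix_cons]
          exact ⟨hcw1.symm ▸ rfl, hwtpre⟩
        rw [hWnil, pvScan1,
          if_pos (by simpa [List.isPrefixOf_iff_prefix] using hmatch), ih]
        have hfd1 : pvFindDigit [(w, d)] (c :: t) = [d] := by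
          rw [pvFindDigit,
            if_pos (by simpa [PySem.Chars.startswith, List.isPrefixOf_iff_prefix] using
              (⟨rest, hrest⟩ : w <+: c :: t))]
        rw [hfd1]
      · -- no word matches at the head of the input
        have hnomatch : ¬ w <+: c :: pvScanW ws t := by
          intro hbad
          rw [← hWnil] at hbad
          exact hwpre (pvRefl ws w (c :: t)
            (fun ch hch p hpmem => pvF_digit w hwmem ch hch p (hws p hpmem)) hbad)
        rw [hWnil, pvScan1,
          if_neg (by simpa [List.isPrefixOf_iff_prefix] using hnomatch), ih]
        have hfd1 : pvFindDigit [(w, d)] (c :: t) = [] := by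
          rw [pvFindDigit,
            if_neg (by simpa [PySem.Chars.startswith, List.isPrefixOf_iff_prefix] using hwpre)]
          rfl
        rw [hfd1]
    · -- some word of ws matched at the head: a digit was inserted after c
      rw [if_neg hfd]
      obtain ⟨p, hpmem, _, hfd2⟩ := pvFd_mem hfd
      have hWsome : pvScanW ws (c :: t) = c :: p.2 :: pvScanW ws t := by
        rw [pvScanW, hfd2]; rfl
      have hnd : ∀ ch ∈ w, ch ≠ p.2 := fun ch hch => pvF_digit w hwmem ch hch p (hws p hpmem)
      obtain ⟨wc, wt, hsh⟩ : ∃ wc wt, w = wc :: wt := by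
        cases w with
        | nil => simp at hw3
        | cons x y => exact ⟨x, y, rfl⟩
      obtain ⟨wc2, wt2, hsh2⟩ : ∃ wc2 wt2, wt = wc2 :: wt2 := by
        cases wt with
        | nil => rw [hsh] at hw3; simp at hw3
        | cons x y => exact ⟨x, y, rfl⟩
      have hno1 : ¬ w <+: c :: p.2 :: pvScanW ws t := by
        rw [hsh, hsh2]
        intro hbad
        rw [List.cons_prefix_cons] at hbad
        rw [List.cons_prefix_cons] at hbad
        exact hnd wc2 (by simp [hsh, hsh2]) hbad.2.1
      have hno2 : ¬ w <+: p.2 :: pvScanW ws t := by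
        rw [hsh]
        intro hbad
        rw [List.cons_prefix_cons] at hbad
        exact hnd wc (by simp [hsh]) hbad.1
      rw [hWsome, pvScan1, if_neg (by simpa [List.isPrefixOf_iff_prefix] using hno1),
        List.nil_append, pvScan1, if_neg (by simpa [List.isPrefixOf_iff_prefix] using hno2),
        List.nil_append, ih, hfd2]
      rfl

-- the nine single-word scans in A's order compose to the combined scan over all nine words
theorem pvChain (l : List Char) :
    pvScan1 "nine".toList '9' (pvScan1 "eight".toList '8' (pvScan1 "seven".toList '7'
      (pvScan1 "six".toList '6' (pvScan1 "five".toList '5' (pvScan1 "four".toList '4'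
        (pvScan1 "three".toList '3' (pvScan1 "two".toList '2'
          (pvScan1 "one".toList '1' l))))))))
      = pvScanW pvWords l := by
  have h1 : pvScan1 "one".toList '1' l = pvScanW [("one".toList, '1')] l := by
    simpa [pvScanW_nil_words] using
      pvK (ws := []) (by simp) (w := "one".toList) (d := '1') (by decide) l
  have h2 := pvK (ws := [("one".toList, '1')]) (by decide)
    (w := "two".toList) (d := '2') (by decide) l
  have h3 := pvK (ws := [("one".toList, '1'), ("two".toList, '2')]) (by decide)
    (w := "three".toList) (d := '3') (by decide)
    l
  have h4 := pvK (ws := [("one".toList, '1'), ("two".toList, '2'), ("three".toList, '3')])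
    (by decide) (w := "four".toList) (d := '4') (by decide)
    l
  have h5 := pvK (ws := [("one".toList, '1'), ("two".toList, '2'), ("three".toList, '3'),
    ("four".toList, '4')]) (by decide) (w := "five".toList) (d := '5') (by decide)
    l
  have h6 := pvK (ws := [("one".toList, '1'), ("two".toList, '2'), ("three".toList, '3'),
    ("four".toList, '4'), ("five".toList, '5')]) (by decide)
    (w := "six".toList) (d := '6') (by decide)
    l
  have h7 := pvK (ws := [("one".toList, '1'), ("two".toList, '2'), ("three".toList, '3'),
    ("four".toList, '4'), ("five".toList, '5'), ("six".toList, '6')]) (by decide)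
    (w := "seven".toList) (d := '7') (by decide)
    l
  have h8 := pvK (ws := [("one".toList, '1'), ("two".toList, '2'), ("three".toList, '3'),
    ("four".toList, '4'), ("five".toList, '5'), ("six".toList, '6'), ("seven".toList, '7')])
    (by decide) (w := "eight".toList) (d := '8') (by decide)
    l
  have h9 := pvK (ws := [("one".toList, '1'), ("two".toList, '2'), ("three".toList, '3'),
    ("four".toList, '4'), ("five".toList, '5'), ("six".toList, '6'), ("seven".toList, '7'),
    ("eight".toList, '8')]) (by decide) (w := "nine".toList) (d := '9') (by decide)
    l
  simp only [List.cons_append, List.nil_append] at h2 h3 h4 h5 h6 h7 h8 h9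
  rw [h1, h2, h3, h4, h5, h6, h7, h8, h9]
  rfl

-- ===== VERDICT (by name: the statement is the Claim_ definition above) =====
set_option maxRecDepth 100000 in
set_option maxHeartbeats 2000000 in
theorem convert_digit_substrings_spec : Claim_equal_convert_digit_substrings := by
  intro line _
  show convert_digit_substrings line = convert_digit_substrings_alt line
  have hkeys : (PySem.Dict.ofList
      [("one", "o1ne"), ("two", "t2wo"), ("three", "t3hree"), ("four", "f4our"),
       ("five", "f5ive"), ("six", "s6ix"), ("seven", "s7even"), ("eight", "e8ight"),
       ("nine", "n9ine")] : PySem.Dict String String).keys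
      = ["one", "two", "three", "four", "five", "six", "seven", "eight", "nine"] := by rfl
  have hg1 : (PySem.Dict.ofList
      [("one", "o1ne"), ("two", "t2wo"), ("three", "t3hree"), ("four", "f4our"),
       ("five", "f5ive"), ("six", "s6ix"), ("seven", "s7even"), ("eight", "e8ight"),
       ("nine", "n9ine")] : PySem.Dict String String).getD "one" "" = "o1ne" := by rfl
  have hg2 : (PySem.Dict.ofList
      [("one", "o1ne"), ("two", "t2wo"), ("three", "t3hree"), ("four", "f4our"),
       ("five", "f5ive"), ("six", "s6ix"), ("seven", "s7even"), ("eight", "e8ight"),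
       ("nine", "n9ine")] : PySem.Dict String String).getD "two" "" = "t2wo" := by rfl
  have hg3 : (PySem.Dict.ofList
      [("one", "o1ne"), ("two", "t2wo"), ("three", "t3hree"), ("four", "f4our"),
       ("five", "f5ive"), ("six", "s6ix"), ("seven", "s7even"), ("eight", "e8ight"),
       ("nine", "n9ine")] : PySem.Dict String String).getD "three" "" = "t3hree" := by rfl
  have hg4 : (PySem.Dict.ofList
      [("one", "o1ne"), ("two", "t2wo"), ("three", "t3hree"), ("four", "f4our"),
       ("five", "f5ive"), ("six", "s6ix"), ("seven", "s7even"), ("eight", "e8ight"),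
       ("nine", "n9ine")] : PySem.Dict String String).getD "four" "" = "f4our" := by rfl
  have hg5 : (PySem.Dict.ofList
      [("one", "o1ne"), ("two", "t2wo"), ("three", "t3hree"), ("four", "f4our"),
       ("five", "f5ive"), ("six", "s6ix"), ("seven", "s7even"), ("eight", "e8ight"),
       ("nine", "n9ine")] : PySem.Dict String String).getD "five" "" = "f5ive" := by rfl
  have hg6 : (PySem.Dict.ofList
      [("one", "o1ne"), ("two", "t2wo"), ("three", "t3hree"), ("four", "f4our"),
       ("five", "f5ive"), ("six", "s6ix"), ("seven", "s7even"), ("eight", "e8ight"),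
       ("nine", "n9ine")] : PySem.Dict String String).getD "six" "" = "s6ix" := by rfl
  have hg7 : (PySem.Dict.ofList
      [("one", "o1ne"), ("two", "t2wo"), ("three", "t3hree"), ("four", "f4our"),
       ("five", "f5ive"), ("six", "s6ix"), ("seven", "s7even"), ("eight", "e8ight"),
       ("nine", "n9ine")] : PySem.Dict String String).getD "seven" "" = "s7even" := by rfl
  have hg8 : (PySem.Dict.ofList
      [("one", "o1ne"), ("two", "t2wo"), ("three", "t3hree"), ("four", "f4our"),
       ("five", "f5ive"), ("six", "s6ix"), ("seven", "s7even"), ("eight", "e8ight"),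
       ("nine", "n9ine")] : PySem.Dict String String).getD "eight" "" = "e8ight" := by rfl
  have hg9 : (PySem.Dict.ofList
      [("one", "o1ne"), ("two", "t2wo"), ("three", "t3hree"), ("four", "f4our"),
       ("five", "f5ive"), ("six", "s6ix"), ("seven", "s7even"), ("eight", "e8ight"),
       ("nine", "n9ine")] : PySem.Dict String String).getD "nine" "" = "n9ine" := by rfl
  simp only [convert_digit_substrings]
  rw [hkeys]
  simp only [List.foldl_cons, List.foldl_nil]
  rw [hg1, hg2, hg3, hg4, hg5, hg6, hg7, hg8, hg9]
  rw [pvStep_eq (w := "one") (by decide) (wc := 'o') (wt := ['n','e']) (d := '1') rfl rfl]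
  rw [pvStep_eq (w := "two") (by decide) (wc := 't') (wt := ['w','o']) (d := '2') rfl rfl]
  rw [pvStep_eq (w := "three") (by decide) (wc := 't') (wt := ['h','r','e','e']) (d := '3') rfl rfl]
  rw [pvStep_eq (w := "four") (by decide) (wc := 'f') (wt := ['o','u','r']) (d := '4') rfl rfl]
  rw [pvStep_eq (w := "five") (by decide) (wc := 'f') (wt := ['i','v','e']) (d := '5') rfl rfl]
  rw [pvStep_eq (w := "six") (by decide) (wc := 's') (wt := ['i','x']) (d := '6') rfl rfl]
  rw [pvStep_eq (w := "seven") (by decide) (wc := 's') (wt := ['e','v','e','n']) (d := '7') rfl rfl]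
  rw [pvStep_eq (w := "eight") (by decide) (wc := 'e') (wt := ['i','g','h','t']) (d := '8') rfl rfl]
  rw [pvStep_eq (w := "nine") (by decide) (wc := 'n') (wt := ['i','n','e']) (d := '9') rfl rfl]
  simp only [String.toList_ofList]
  rw [pvChain]
  rfl
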